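-- pv_equiv track=rewrite | github.com/YichuanAlex/CTA_Trading_Platform | mock_data_generator.py | _root_prefix
-- ===== SOURCE A (Python) =====
-- def _root_prefix(root):
--     base = root.split(".")[0]
--     prefix = ""
--     for ch in base:
--         if ch.isdigit():
--             break
--         prefix += ch
--     return prefix if prefix else base
-- ===== SOURCE B (Python) =====
-- def _root_prefix(root):
--     base = root.split(".")[0]
--     idx = next((i for i, c in enumerate(base) if c.isdigit()), len(base))
--     prefix = base[:idx]
--     return prefix if prefix else base
-- ===== Notes on version B (the rewrite author's own statement) =====
-- stated objective: simpler
-- what changed: B locates the first digit's index and takes one slice instead of accumulating the prefix character by character with string concatenation and a break.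
import Mathlib
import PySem

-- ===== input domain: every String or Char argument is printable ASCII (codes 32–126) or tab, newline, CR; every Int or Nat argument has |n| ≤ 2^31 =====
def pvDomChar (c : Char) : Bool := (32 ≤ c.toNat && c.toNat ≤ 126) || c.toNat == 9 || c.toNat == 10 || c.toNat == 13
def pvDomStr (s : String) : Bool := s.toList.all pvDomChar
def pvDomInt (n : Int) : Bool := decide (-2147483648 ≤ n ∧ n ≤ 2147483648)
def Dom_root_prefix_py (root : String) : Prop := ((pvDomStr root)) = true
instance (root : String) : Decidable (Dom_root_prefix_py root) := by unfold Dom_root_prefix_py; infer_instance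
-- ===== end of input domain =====

-- B replaces A's character-by-character prefix accumulation with find-first-digit-index then one slice (objective: simpler).

-- ===== PORT A =====
-- the for-loop with break, carried prefix accumulator; 'prefix += ch' is the append
def rootPrefixLoopA (pre : List Char) : List Char → List Char
  | [] => pre
  | c :: rest => if PySem.Chars.isdigit c then pre else rootPrefixLoopA (pre ++ [c]) rest

def root_prefix_py (root : String) : String :=
  -- root.split(".")[0]: split? with sep "." is always some, and the result is never empty, so [0] is its head
  let base := ((PySem.Str.split? root ".").getD []).headD ""
  let pre := rootPrefixLoopA [] base.toList
  if pre.isEmpty then base else String.ofList pre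

-- ===== PORT B =====
def root_prefix_py_alt (root : String) : String :=
  let base := ((PySem.Str.split? root ".").getD []).headD ""
  -- next((i for i,c in enumerate(base) if c.isdigit()), len(base))
  let idx := base.toList.findIdx PySem.Chars.isdigit
  -- base[:idx]
  let pre := PySem.Chars.slice base.toList none (some (idx : Int))
  if pre.isEmpty then base else String.ofList pre

-- ===== PRECONDITION & SPEC =====
def Spec_root_prefix_py (root : String) (out : String) : Prop := out = root_prefix_py_alt root
instance (root : String) (out : String) : Decidable (Spec_root_prefix_py root out) := by unfold Spec_root_prefix_py; infer_instance

-- ===== CLAIM (what is proved, stated in full; the proofs are below) =====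
def Claim_equal_root_prefix_py : Prop := ∀ (root : String), Dom_root_prefix_py root → Spec_root_prefix_py root (root_prefix_py root)

-- ===== LEMMAS AND PROOFS =====
theorem loopA_eq (l : List Char) : ∀ pre, rootPrefixLoopA pre l = pre ++ l.takeWhile (fun c => !PySem.Chars.isdigit c) := by
  induction l with
  | nil => intro pre; simp [rootPrefixLoopA]
  | cons c rest ih =>
      intro pre
      by_cases h : PySem.Chars.isdigit c = true
      · simp [rootPrefixLoopA, h]
      · simp only [Bool.not_eq_true] at h
        simp [rootPrefixLoopA, h, ih]

theorem take_findIdx_eq (l : List Char) : l.take (l.findIdx PySem.Chars.isdigit) = l.takeWhile (fun c => !PySem.Chars.isdigit c) := by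
  induction l with
  | nil => simp
  | cons c rest ih =>
      by_cases h : PySem.Chars.isdigit c = true
      · simp [List.findIdx_cons, h]
      · simp only [Bool.not_eq_true] at h
        simp [List.findIdx_cons, h, ih]

theorem root_prefix_py_spec : Claim_equal_root_prefix_py := by
  intro root _
  show root_prefix_py root = root_prefix_py_alt root
  unfold root_prefix_py root_prefix_py_alt
  simp only [loopA_eq, List.nil_append, PySem.Chars.slice_eq_listSlice,
    PySem.List.slice_to_natCast, take_findIdx_eq]
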